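-- pv_equiv track=rewrite | github.com/MarkLaMer/StackBasedRecursionSimulation | stack_based_recursion_simulation.py | function_4
-- ===== SOURCE A (Python) =====
-- class Stack:
--     # Construct new stack:
--     def __init__ (self):
--         """
--         Create a stack with a fixed size of 10
--         """
--         self.array = [None]*10
--         self.size = 0  # Number of elements currently in the stack
--
--     # Neccessary functions for Stack:
--     def push(self, item):
--         """
--         Push an item onto the stack (end of array). If the stack is full, double the size of the stack
--         """
--         if self.size == len(self.array):
--             self.array = self.array + [None]*len(self.array)
--         self.array[self.size] = item # Add the item to the end of the array
--         self.size += 1 #Update the size of the stack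
--
--     def pop(self):
--         """
--         Pop the last item from the stack array. If the stack is empty, return None
--         """
--         if self.size == 0:
--             return None
--         value = self.array[self.size-1]
--         self.array[self.size-1] = None # Set the last elem to None
--         self.size -= 1 #Decrease the size of the stack
--         return value
--
--     def isEmpty(self):
--         """
--         Return True if the stack is empty, False otherwise
--         """
--         return self.size == 0
--
--   # Useful functions for a stack:
--
--     def peak(self):
--         """
--         Return the item at the top of the stack
--         """
--         if self.size == 0:
--             return None
--         return self.array[self.size-1]
--
--     def isFull(self):
--         """
--         Return True if the stack is full, False otherwise
--         """
--         return self.size == len(self.array)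
--
--     def __str__(self):
--         """
--         Return a string representation of the stack.
--         """
--         return str([self.array[i] for i in range(self.size)])
--
-- def function_4(a, b):
--     #Think of the problem as a binary tree. Every node may have a left and right child node bacsed on the parent node a, b and m values.
--     S = Stack()
--     S.push((a, b, False))  # Push the initial range and the flag to indicate we have not "completed" the node connections to children.
--     result = []     # Initialize list to store the value of m from the node traversal in-order
--
--     while not S.isEmpty():
--         a, b, completed = S.pop() #load up the last node from the stac (moving down left nodes and progressing right)
--
--         m = (a+b)//2 #calculate the mid point ("m") value
--
--         if completed: #grab the value of m from the last node we popped off the stack if we have already completed a search for any children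
--             # Append the popped node's mid point value
--             result.append(m)
--             continue  # next iteration!
--
--         else:
--             #Push the parent node because we popped it off the stack earlier
--             S.push((a,b, True)) #set flag to true
--
--             if m+1 <= b: #if right node condition is satisfied:
--                 S.push((m+1, b, False)) # Push the right side
--             # Now that we are checking its children, we can say we completed the search of this node.
--             if a <= m-1: #if left node condition is satisfied:
--                 S.push((a, m-1, False)) # Push the left side
--
--
--     return result
-- ===== SOURCE B (Python) =====
-- def function_4(a, b):
--     # Direct recursion instead of A's explicit-stack simulation:
--     # post-order walk of the midpoint tree of the range [a, b].
--     m = (a + b) // 2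
--     res = []
--     if a <= m - 1:
--         res += function_4(a, m - 1)
--     if m + 1 <= b:
--         res += function_4(m + 1, b)
--     res.append(m)
--     return res
-- ===== Notes on version B (the rewrite author's own statement) =====
-- stated objective: simpler
-- what changed: Replaces A's explicit stack machine (tuples with completed-flags simulating recursion) by the direct recursive post-order walk of the range's midpoint tree.
import Mathlib
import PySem

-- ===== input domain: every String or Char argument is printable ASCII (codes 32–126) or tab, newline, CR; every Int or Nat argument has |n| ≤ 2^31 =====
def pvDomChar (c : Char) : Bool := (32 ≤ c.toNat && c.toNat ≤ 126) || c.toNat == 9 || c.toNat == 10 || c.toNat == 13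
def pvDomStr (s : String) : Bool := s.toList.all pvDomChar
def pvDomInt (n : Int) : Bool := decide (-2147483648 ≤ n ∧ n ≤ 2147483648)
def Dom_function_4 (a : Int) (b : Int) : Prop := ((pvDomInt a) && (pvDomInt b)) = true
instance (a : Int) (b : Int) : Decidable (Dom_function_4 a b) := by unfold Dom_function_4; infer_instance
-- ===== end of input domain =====

-- B replaces A's explicit stack machine (tuples with completed-flags simulating recursion)
-- by the direct recursive post-order walk of the range's midpoint tree; same return value.


-- ===== PORT A =====
-- A's while-loop. The Python Stack class is observably a LIFO list, ported with the list
-- head as the top of the stack; one iteration pops the head and, in the not-completed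
-- branch, pushes parent (completed), right child, left child in that order.
-- The Nat argument is FUEL, a pure totality guard (the loop terminates; function_4 hands
-- it enough fuel for every input, proved in pvLoop_run below): with sufficient fuel the
-- 0-case is never reached.
def f4loop : Nat → List (Int × Int × Bool) → List Int → List Int
  | _, [], res => res
  | 0, _ :: _, res => res
  | n + 1, (a, b, c) :: S, res =>
    let m := PySem.Int.floordiv (a + b) 2
    if c then
      f4loop n S (res ++ [m])
    else
      f4loop n ((if a ≤ m - 1 then [(a, m - 1, false)] else []) ++
                (if m + 1 ≤ b then [(m + 1, b, false)] else []) ++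
                (a, b, true) :: S) res

def function_4 (a : Int) (b : Int) : List Int :=
  f4loop (4 * (b - a + 1).toNat + 3) [(a, b, false)] []

-- ===== PORT B =====
-- direct recursion; the Nat argument is FUEL, a pure totality guard (proved sufficient
-- in pvRec_fuel below): with sufficient fuel the 0-case is never reached.
def f4rec : Nat → Int → Int → List Int
  | 0, _, _ => []
  | n + 1, a, b =>
    let m := PySem.Int.floordiv (a + b) 2
    (if a ≤ m - 1 then f4rec n a (m - 1) else []) ++
      (if m + 1 ≤ b then f4rec n (m + 1) b else []) ++ [m]

def function_4_alt (a : Int) (b : Int) : List Int :=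
  f4rec ((b - a).toNat + 1) a b

-- ===== PRECONDITION & SPEC =====
def Spec_function_4 (a : Int) (b : Int) (out : List Int) : Prop := out = function_4_alt a b
instance (a : Int) (b : Int) (out : List Int) : Decidable (Spec_function_4 a b out) := by unfold Spec_function_4; infer_instance

-- ===== CLAIM (what is proved, stated in full; the proofs are below) =====
def Claim_equal_function_4 : Prop := ∀ (a : Int) (b : Int), Dom_function_4 a b → Spec_function_4 a b (function_4 a b)

-- ===== LEMMAS AND PROOFS =====
-- midpoint bracket: m = (a+b)//2 satisfies m*2 ≤ a+b < (m+1)*2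
theorem pvMidBracket (a b : Int) :
    (PySem.Int.floordiv (a + b) 2) * 2 ≤ a + b ∧
      a + b < (PySem.Int.floordiv (a + b) 2 + 1) * 2 :=
  (PySem.Int.floordiv_eq_iff_of_pos (by norm_num)).mp rfl

-- weight of a stack entry: an upper bound on the loop iterations it still causes
def pvWeight (e : Int × Int × Bool) : Nat :=
  if e.2.2 then 1 else 4 * (e.2.1 - e.1 + 1).toNat + 2

theorem pvWeight_true (a b : Int) : pvWeight (a, b, true) = 1 := rfl
theorem pvWeight_false (a b : Int) :
    pvWeight (a, b, false) = 4 * (b - a + 1).toNat + 2 := rfl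

-- enough fuel: f4rec is independent of the fuel once it exceeds the range length
theorem pvRec_fuel (n : Nat) :
    ∀ (a b : Int), (b - a).toNat < n → f4rec n a b = function_4_alt a b := by
  induction n using Nat.strong_induction_on with
  | _ n ih =>
    match n with
    | 0 => intro a b h; omega
    | n + 1 =>
      intro a b h
      have hb := pvMidBracket a b
      rw [function_4_alt, f4rec, f4rec]
      by_cases hL : a ≤ PySem.Int.floordiv (a + b) 2 - 1 <;>
        by_cases hR : PySem.Int.floordiv (a + b) 2 + 1 ≤ b
      · rw [if_pos hL, if_pos hL, if_pos hR, if_pos hR,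
          ih n (by omega) a _ (by omega), ih (b - a).toNat (by omega) a _ (by omega),
          ih n (by omega) _ b (by omega), ih (b - a).toNat (by omega) _ b (by omega)]
      · rw [if_pos hL, if_pos hL, if_neg hR, if_neg hR,
          ih n (by omega) a _ (by omega), ih (b - a).toNat (by omega) a _ (by omega)]
      · rw [if_neg hL, if_neg hL, if_pos hR, if_pos hR,
          ih n (by omega) _ b (by omega), ih (b - a).toNat (by omega) _ b (by omega)]
      · rw [if_neg hL, if_neg hL, if_neg hR, if_neg hR]

-- one unfolding of B matched to the loop's children
theorem pvAlt_unfold (a b : Int) :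
    function_4_alt a b =
      (if a ≤ PySem.Int.floordiv (a + b) 2 - 1
        then function_4_alt a (PySem.Int.floordiv (a + b) 2 - 1) else []) ++
      (if PySem.Int.floordiv (a + b) 2 + 1 ≤ b
        then function_4_alt (PySem.Int.floordiv (a + b) 2 + 1) b else []) ++
      [PySem.Int.floordiv (a + b) 2] := by
  have hb := pvMidBracket a b
  rw [function_4_alt, f4rec]
  by_cases hL : a ≤ PySem.Int.floordiv (a + b) 2 - 1 <;>
    by_cases hR : PySem.Int.floordiv (a + b) 2 + 1 ≤ b
  · rw [if_pos hL, if_pos hL, if_pos hR, if_pos hR,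
      pvRec_fuel _ a _ (by omega), pvRec_fuel _ _ b (by omega)]
  · rw [if_pos hL, if_pos hL, if_neg hR, if_neg hR, pvRec_fuel _ a _ (by omega)]
  · rw [if_neg hL, if_neg hL, if_pos hR, if_pos hR, pvRec_fuel _ _ b (by omega)]
  · rw [if_neg hL, if_neg hL, if_neg hR, if_neg hR]

-- the loop leaves an empty stack alone, at any fuel
theorem pvLoop_nil (n : Nat) (res : List Int) : f4loop n [] res = res := by
  match n with
  | 0 => rfl
  | _ + 1 => rfl

-- one loop step at a completed node
theorem pvTrue_step (n : Nat) (a b : Int) (S : List (Int × Int × Bool)) (res : List Int) :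
    f4loop (n + 1) ((a, b, true) :: S) res =
      f4loop n S (res ++ [PySem.Int.floordiv (a + b) 2]) := by
  rw [f4loop]
  rfl

-- one loop step at a not-completed node strictly shrinks the total weight
theorem pvStep_weight (a b : Int) (S : List (Int × Int × Bool)) :
    ((((if a ≤ PySem.Int.floordiv (a + b) 2 - 1
          then [(a, PySem.Int.floordiv (a + b) 2 - 1, false)] else []) ++
        (if PySem.Int.floordiv (a + b) 2 + 1 ≤ b
          then [(PySem.Int.floordiv (a + b) 2 + 1, b, false)] else []) ++
        (a, b, true) :: S).map pvWeight).sum) + 1 ≤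
      (((a, b, false) :: S).map pvWeight).sum := by
  have hb := pvMidBracket a b
  split_ifs <;> simp only [List.map_cons, List.sum_cons, List.nil_append, List.cons_append, pvWeight_true, pvWeight_false] <;> omega

-- enough fuel: the loop's value is independent of the fuel once it covers the weight
theorem pvLoop_fuel (n : Nat) :
    ∀ (n' : Nat) (S : List (Int × Int × Bool)) (res : List Int),
      (S.map pvWeight).sum ≤ n → (S.map pvWeight).sum ≤ n' →
      f4loop n S res = f4loop n' S res := by
  induction n with
  | zero =>
    intro n' S res h _
    match S with
    | [] => rw [pvLoop_nil, pvLoop_nil]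
    | (a, b, c) :: S =>
      have hw : 1 ≤ pvWeight (a, b, c) := by unfold pvWeight; split <;> omega
      simp only [List.map_cons, List.sum_cons] at h
      omega
  | succ k ih =>
    intro n' S res h h'
    match S with
    | [] => rw [pvLoop_nil, pvLoop_nil]
    | (a, b, c) :: S =>
      have hw : 1 ≤ pvWeight (a, b, c) := by unfold pvWeight; split <;> omega
      simp only [List.map_cons, List.sum_cons] at h h'
      match n' with
      | 0 => omega
      | n'' + 1 =>
        rw [f4loop, f4loop]
        cases c
        · have hs := pvStep_weight a b S
          simp only [List.map_cons, List.sum_cons] at hs ⊢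
          exact ih n'' _ res (by omega) (by omega)
        · rw [pvWeight_true] at h h'
          exact ih n'' S _ (by omega) (by omega)

-- Popping a not-completed node processes its whole subtree and appends exactly
-- B's post-order list for that range, landing at the canonical remaining fuel.
theorem pvLoop_run (k : Nat) :
    ∀ (a b : Int) (S : List (Int × Int × Bool)) (res : List Int) (n : Nat),
      (b - a).toNat ≤ k →
      ((((a, b, false) :: S).map pvWeight).sum) ≤ n →
      f4loop n ((a, b, false) :: S) res =
        f4loop ((S.map pvWeight).sum + 1) S (res ++ function_4_alt a b) := by
  induction k with
  | zero =>
    intro a b S res n hk hn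
    have hb := pvMidBracket a b
    have hL : ¬ a ≤ PySem.Int.floordiv (a + b) 2 - 1 := by omega
    have hR : ¬ PySem.Int.floordiv (a + b) 2 + 1 ≤ b := by omega
    simp only [List.map_cons, List.sum_cons, pvWeight_false] at hn
    match n with
    | 0 => omega
    | n + 1 =>
      rw [f4loop, if_neg (by simp), if_neg hL, if_neg hR, List.nil_append,
        List.nil_append, pvAlt_unfold, if_neg hL, if_neg hR, List.nil_append,
        List.nil_append,
        pvLoop_fuel n ((S.map pvWeight).sum + 1 + 1) _ res
          (by simp only [List.map_cons, List.sum_cons, pvWeight_true]; omega)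
          (by simp only [List.map_cons, List.sum_cons, pvWeight_true]; omega),
        pvTrue_step]
  | succ k ih =>
    intro a b S res n hk hn
    have hb := pvMidBracket a b
    simp only [List.map_cons, List.sum_cons, pvWeight_false] at hn
    match n with
    | 0 => omega
    | n + 1 =>
      rw [f4loop, if_neg (by simp), pvAlt_unfold]
      by_cases hL : a ≤ PySem.Int.floordiv (a + b) 2 - 1 <;>
        by_cases hR : PySem.Int.floordiv (a + b) 2 + 1 ≤ b <;>
        simp only [hL, hR, if_true, if_false, List.cons_append, List.nil_append]
      · rw [ih a _ _ res n (by omega)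
          (by simp only [List.map_cons, List.sum_cons, pvWeight_true,
                pvWeight_false]; omega)]
        rw [ih _ b _ _ _ (by omega)
          (by simp only [List.map_cons, List.sum_cons, pvWeight_true,
                pvWeight_false]; omega)]
        rw [show ((((a, b, true) :: S).map pvWeight).sum + 1)
              = ((S.map pvWeight).sum + 1) + 1 by
            simp only [List.map_cons, List.sum_cons, pvWeight_true]; omega]
        rw [pvTrue_step, List.append_assoc, List.append_assoc, List.append_assoc]
      · rw [ih a _ _ res n (by omega)
          (by simp only [List.map_cons, List.sum_cons, pvWeight_true,
                pvWeight_false]; omega)]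
        rw [show ((((a, b, true) :: S).map pvWeight).sum + 1)
              = ((S.map pvWeight).sum + 1) + 1 by
            simp only [List.map_cons, List.sum_cons, pvWeight_true]; omega]
        rw [pvTrue_step, List.append_assoc, List.append_nil]
      · rw [ih _ b _ res n (by omega)
          (by simp only [List.map_cons, List.sum_cons, pvWeight_true,
                pvWeight_false]; omega)]
        rw [show ((((a, b, true) :: S).map pvWeight).sum + 1)
              = ((S.map pvWeight).sum + 1) + 1 by
            simp only [List.map_cons, List.sum_cons, pvWeight_true]; omega]
        rw [pvTrue_step, List.append_assoc]
      · rw [pvLoop_fuel n ((S.map pvWeight).sum + 1 + 1) _ res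
            (by simp only [List.map_cons, List.sum_cons, pvWeight_true]; omega)
            (by simp only [List.map_cons, List.sum_cons, pvWeight_true]; omega),
          pvTrue_step]

-- ===== VERDICT (by name: the statement is the Claim_ definition above) =====
theorem function_4_spec : Claim_equal_function_4 := by
  intro a b _
  show function_4 a b = function_4_alt a b
  rw [function_4,
    pvLoop_run (b - a).toNat a b [] [] _ (le_refl _) (by simp only [List.map_cons, List.map_nil, List.sum_cons, List.sum_nil, pvWeight_false]; omega),
    pvLoop_nil, List.nil_append]
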